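-- pv_equiv track=rewrite | github.com/ChironJC/sparse-matrix | Sparse.py | upperSpar
-- ===== SOURCE A (Python) =====
-- def upperSpar(A):
--     # Store the upper part of a sparse matrix
--     n = len(A)
--     adj = []
--     xadj = []
--     count = 0
--     for i in range(0,n):
--         xadj.append(count)
--         try:
--             for j in range(0,i):
--                 if A[i][j] == 1:
--                     adj.append(j)
--                     count += 1
--         except ValueError:
--             pass
--     xadj.append(count)
--     return [adj, xadj]
-- ===== SOURCE B (Python) =====
-- def upperSpar(A):
--     # Column-major scan: walk each column j top-down, bucketing hits by row,
--     # then emit CSR arrays from the row buckets.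
--     n = len(A)
--     buckets = [[] for _ in range(n)]
--     for j in range(n):
--         for i in range(j + 1, n):
--             if A[i][j] == 1:
--                 buckets[i].append(j)
--     adj = []
--     xadj = [0]
--     for b in buckets:
--         adj += b
--         xadj.append(xadj[-1] + len(b))
--     return [adj, xadj]
-- ===== Notes on version B (the rewrite author's own statement) =====
-- stated objective: alternative
-- what changed: B traverses the matrix column-major (for each column j, scan rows i>j) bucketing hit columns per row, then emits adj/xadj from the buckets, instead of A's row-major nested scan threading a running counter.
import Mathlib
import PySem

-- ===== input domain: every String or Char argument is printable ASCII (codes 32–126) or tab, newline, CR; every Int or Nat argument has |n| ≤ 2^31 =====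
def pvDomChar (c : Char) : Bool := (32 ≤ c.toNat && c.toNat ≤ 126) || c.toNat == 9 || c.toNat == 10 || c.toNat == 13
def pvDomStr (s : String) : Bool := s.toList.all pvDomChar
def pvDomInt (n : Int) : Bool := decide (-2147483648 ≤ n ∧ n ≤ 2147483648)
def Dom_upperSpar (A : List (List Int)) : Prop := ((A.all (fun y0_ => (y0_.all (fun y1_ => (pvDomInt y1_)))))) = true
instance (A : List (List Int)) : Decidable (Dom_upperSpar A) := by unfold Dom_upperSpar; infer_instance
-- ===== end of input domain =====

-- B scans the matrix column-major (for each column j, the rows i > j),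
-- bucketing hit columns per row, then emits adj/xadj from the buckets —
-- instead of A's row-major nested scan threading one running counter.

-- ===== PORT A =====
def upperSpar (A : List (List Int)) : List (List Int) :=
  let n : Int := PySem.List.len A
  let st := (PySem.List.pyRange 0 n 1).foldl
    (fun (st : List Int × List Int × Int) i =>
      let xadj := st.2.1 ++ [st.2.2]
      let inner := (PySem.List.pyRange 0 i 1).foldl
        (fun (st2 : List Int × Int) j =>
          if PySem.List.pyGetD (PySem.List.pyGetD A i []) j 0 == 1 then
            (st2.1 ++ [j], st2.2 + 1)
          else st2) (st.1, st.2.2)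
      (inner.1, xadj, inner.2)) ([], [], 0)
  [st.1, st.2.1 ++ [st.2.2]]

-- ===== PORT B =====
def upperSpar_alt (A : List (List Int)) : List (List Int) :=
  let n : Int := PySem.List.len A
  let buckets0 : List (List Int) := (PySem.List.pyRange 0 n 1).map (fun _ => [])
  let buckets := (PySem.List.pyRange 0 n 1).foldl
    (fun (bs : List (List Int)) j =>
      (PySem.List.pyRange (j + 1) n 1).foldl
        (fun (bs2 : List (List Int)) i =>
          if PySem.List.pyGetD (PySem.List.pyGetD A i []) j 0 == 1 then
            -- buckets[i].append(j): exact, since i ≥ 1 here (Python's negative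
            -- indices never occur), so Python's buckets[i] is position i.toNat
            bs2.modify i.toNat (fun b => b ++ [j])
          else bs2) bs) buckets0
  let st := buckets.foldl
    (fun (st : List Int × List Int) b =>
      -- xadj[-1]: exact, xadj starts as [0] and only grows, so it is the last element
      (st.1 ++ b, st.2 ++ [st.2.getLastD 0 + PySem.List.len b]))
    ([], [0])
  [st.1, st.2]

-- ===== PRECONDITION & SPEC =====
-- Pre_ excludes ragged inputs where some row i is shorter than i: there the
-- Python A raises IndexError on A[i][j] (the try only catches ValueError).
def Pre_upperSpar (A : List (List Int)) : Prop :=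
  ∀ p ∈ A.zipIdx, p.2 ≤ p.1.length
instance (A : List (List Int)) : Decidable (Pre_upperSpar A) := by unfold Pre_upperSpar; infer_instance
def pvWitness_upperSpar : List (List Int) := [[0], [1, 0], [1, 1, 0]]
def Spec_upperSpar (A : List (List Int)) (out : List (List Int)) : Prop := out = upperSpar_alt A
instance (A : List (List Int)) (out : List (List Int)) : Decidable (Spec_upperSpar A out) := by unfold Spec_upperSpar; infer_instance

-- ===== CLAIM (what is proved, stated in full; the proofs are below) =====
def Claim_equal_upperSpar : Prop := ∀ (A : List (List Int)), Dom_upperSpar A → Pre_upperSpar A → Spec_upperSpar A (upperSpar A)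

-- ===== LEMMAS AND PROOFS =====

-- The list of columns of row k kept by both programs, and the xadj tail from
-- a running total c over a list of rows.
def pvRowf (A : List (List Int)) (k : Nat) : List Int :=
  ((List.range k).filter (fun j : Nat => PySem.List.pyGetD (A.getD k []) ((j : Nat) : Int) 0 == 1)).map
    (fun j => ((j : Nat) : Int))

def pvOffs (c : Int) : List (List Int) → List Int
  | [] => [c]
  | r :: rs => c :: pvOffs (c + (r.length : Int)) rs

-- A's inner loop over j appends exactly the filtered columns and counts them.
theorem innerFold_eq (L : List Int) (p : Int → Bool) :
    ∀ (adj : List Int) (c : Int),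
      L.foldl (fun (st2 : List Int × Int) j =>
          if p j then (st2.1 ++ [j], st2.2 + 1) else st2) (adj, c)
        = (adj ++ L.filter p, c + (L.filter p).length) := by
  induction L with
  | nil => intro adj c; simp
  | cons x L ih =>
    intro adj c
    by_cases hx : p x = true
    · simp [hx, ih, add_comm, add_left_comm]
    · simp [hx, ih]

-- A's outer fold (rows already abstracted to their column lists), closed form.
theorem foldA_closed (rs : List (List Int)) :
    ∀ (adj xadj : List Int) (c : Int),
      (rs.foldl (fun (st : List Int × List Int × Int) r =>
          (st.1 ++ r, st.2.1 ++ [st.2.2], st.2.2 + (r.length : Int))) (adj, xadj, c)).1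
        = adj ++ rs.flatten ∧
      (rs.foldl (fun (st : List Int × List Int × Int) r =>
          (st.1 ++ r, st.2.1 ++ [st.2.2], st.2.2 + (r.length : Int))) (adj, xadj, c)).2.1
        ++ [(rs.foldl (fun (st : List Int × List Int × Int) r =>
          (st.1 ++ r, st.2.1 ++ [st.2.2], st.2.2 + (r.length : Int))) (adj, xadj, c)).2.2]
        = xadj ++ pvOffs c rs := by
  induction rs with
  | nil => intro adj xadj c; simp [pvOffs]
  | cons r rs ih =>
    intro adj xadj c
    have := ih (adj ++ r) (xadj ++ [c]) (c + (r.length : Int))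
    simpa [pvOffs, List.append_assoc] using this

-- B's emission fold, closed form (xadj nonempty, last element tracked as c).
theorem foldB_closed (rs : List (List Int)) :
    ∀ (adj xadj : List Int) (c : Int),
      rs.foldl (fun (st : List Int × List Int) b =>
          (st.1 ++ b, st.2 ++ [st.2.getLastD 0 + (b.length : Int)])) (adj, xadj ++ [c])
        = (adj ++ rs.flatten, xadj ++ pvOffs c rs) := by
  induction rs with
  | nil => intro adj xadj c; simp [pvOffs]
  | cons r rs ih =>
    intro adj xadj c
    have h : (xadj ++ [c]).getLastD 0 = c := List.getLastD_concat
    have := ih (adj ++ r) (xadj ++ [c]) (c + (r.length : Int))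
    simp only [List.foldl_cons, h]
    simpa [pvOffs, List.append_assoc] using this

-- Any fold of conditional modifies preserves the length.
theorem foldl_modify_length (q : Int → Bool) (f : List Int → List Int) :
    ∀ (L : List Int) (bs : List (List Int)),
      (L.foldl (fun bs2 i => if q i then bs2.modify i.toNat f else bs2) bs).length
        = bs.length := by
  intro L
  induction L with
  | nil => intro bs; rfl
  | cons x L ih =>
    intro bs
    by_cases hx : q x = true <;> simp [hx, ih, List.length_modify]

-- The column scan (any column list) preserves the number of buckets.
theorem outer_fold_length (A : List (List Int)) (n : Int) :
    ∀ (L : List Int) (bs : List (List Int)),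
      (L.foldl (fun bs j =>
          (PySem.List.pyRange (j + 1) n 1).foldl
            (fun bs2 i =>
              if PySem.List.pyGetD (PySem.List.pyGetD A i []) j 0 == 1 then
                bs2.modify i.toNat (fun b => b ++ [j])
              else bs2) bs) bs).length = bs.length := by
  intro L
  induction L with
  | nil => intro bs; rfl
  | cons x L ih =>
    intro bs
    simp only [List.foldl_cons]
    rw [ih, foldl_modify_length]

-- One column's inner fold, seen at bucket k.
theorem innerB_getD (q : Int → Bool) (v : Int) :
    ∀ (m : Nat) (a : Int), 0 ≤ a → ∀ (bs : List (List Int)) (k : Nat), k < bs.length →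
      (((List.range m).map (fun t : Nat => a + (t : Int))).foldl
          (fun bs2 i => if q i then bs2.modify i.toNat (fun b => b ++ [v]) else bs2) bs).getD k []
        = if a ≤ (k : Int) ∧ (k : Int) < a + m ∧ q k then bs.getD k [] ++ [v]
          else bs.getD k [] := by
  intro m
  induction m with
  | zero =>
    intro a _ bs k _
    have hc : ¬ (a ≤ (k : Int) ∧ (k : Int) < a + ((0 : Nat) : Int) ∧ q ↑k = true) := by
      rintro ⟨h1, h2, _⟩; push_cast at h2; omega
    simp only [List.range_zero, List.map_nil, List.foldl_nil]
    rw [if_neg (by push_cast; push_cast at hc; exact hc)]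
  | succ m ih =>
    intro a ha bs k hk
    have hmap : (List.range (m + 1)).map (fun t : Nat => a + (t : Int))
        = a :: (List.range m).map (fun t : Nat => (a + 1) + (t : Int)) := by
      rw [List.range_succ_eq_map, List.map_cons, List.map_map]
      congr 1
      · simp
      · apply List.map_congr_left; intro t _; simp only [Function.comp]; push_cast; ring
    rw [hmap]
    simp only [List.foldl_cons]
    set bs' := (if q a then bs.modify a.toNat (fun b => b ++ [v]) else bs) with hbs'
    have hlen : k < bs'.length := by
      rw [hbs']; by_cases hq : q a = true <;> simp [hq, List.length_modify, hk]
    have step := ih (a + 1) (by omega) bs' k hlen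
    rw [step]
    have hget : bs'.getD k [] =
        if a = (k : Int) ∧ q ↑k then bs.getD k [] ++ [v] else bs.getD k [] := by
      rw [hbs']
      by_cases hak : a = (k : Int)
      · have htn : a.toNat = k := by omega
        by_cases hq : q ↑k = true
        · have hqa : q a = true := by rw [hak]; exact hq
          rw [hak, htn] at *
          simp [hq, List.getD_eq_getElem?_getD, List.getElem?_eq_getElem hk]
        · have hqa : ¬ q a = true := by rw [hak]; exact hq
          simp [hak, hq]
      · have htn : a.toNat ≠ k := by omega
        by_cases hq : q a = true
        · simp [hq, hak, List.getD_eq_getElem?_getD, htn]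
        · simp [hq, hak]
    rw [hget]
    by_cases hq : q ↑k = true
    · by_cases hak : a = (k : Int)
      · have h1 : ¬ (a + 1 ≤ (k : Int) ∧ (k : Int) < a + 1 + m ∧ q ↑k) := by
          rintro ⟨h, _, _⟩; omega
        have h2 : a ≤ (k : Int) ∧ (k : Int) < a + (m + 1 : Nat) ∧ q ↑k := by
          refine ⟨by omega, by push_cast; omega, hq⟩
        simp [h2, hak]
      · have hiff : (a + 1 ≤ (k : Int) ∧ (k : Int) < a + 1 + (m : Int))
            ↔ (a ≤ (k : Int) ∧ (k : Int) < a + ((m + 1 : Nat) : Int)) := by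
          push_cast; omega
        simp only [hak, hq, and_true, if_false]
        rw [if_congr hiff rfl rfl]
    · have h1 : ¬ (a + 1 ≤ (k : Int) ∧ (k : Int) < a + 1 + m ∧ q ↑k) := by
        rintro ⟨_, _, h⟩; exact hq h
      have h2 : ¬ (a ≤ (k : Int) ∧ (k : Int) < a + (m + 1 : Nat) ∧ q ↑k) := by
        rintro ⟨_, _, h⟩; exact hq h
      simp [hq]

-- The whole column scan, seen at bucket k (k < N = number of rows).
theorem outerB_getD (A : List (List Int)) (N : Nat) :
    ∀ (m : Nat) (bs : List (List Int)), bs.length = N → ∀ (k : Nat), k < N →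
      (((List.range m).map (fun t => ((t : Nat) : Int))).foldl
          (fun bs j =>
            (PySem.List.pyRange (j + 1) (N : Int) 1).foldl
              (fun bs2 i =>
                if PySem.List.pyGetD (PySem.List.pyGetD A i []) j 0 == 1 then
                  bs2.modify i.toNat (fun b => b ++ [j])
                else bs2) bs) bs).getD k []
        = bs.getD k [] ++
          ((List.range m).filter (fun j =>
              decide (j < k) && (PySem.List.pyGetD (A.getD k []) (j : Int) 0 == 1))).map
            (fun j => ((j : Nat) : Int)) := by
  intro m
  induction m with
  | zero => intro bs _ k _; simp
  | succ m ih =>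
    intro bs hlen k hk
    rw [List.range_succ, List.map_append, List.foldl_append]
    set bsm := ((List.range m).map (fun t => ((t : Nat) : Int))).foldl
      (fun bs j =>
        (PySem.List.pyRange (j + 1) (N : Int) 1).foldl
          (fun bs2 i =>
            if PySem.List.pyGetD (PySem.List.pyGetD A i []) j 0 == 1 then
              bs2.modify i.toNat (fun b => b ++ [j])
            else bs2) bs) bs with hbsm
    have hlenm : bsm.length = N := by
      rw [hbsm, outer_fold_length]; exact hlen
    simp only [List.foldl_cons, List.foldl_nil, List.map_cons, List.map_nil]
    rw [PySem.List.pyRange_one]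
    have hstep := innerB_getD
      (fun i => PySem.List.pyGetD (PySem.List.pyGetD A i []) (m : Int) 0 == 1)
      ((m : Nat) : Int) (((N : Int) - ((m : Int) + 1)).toNat) ((m : Int) + 1)
      (by omega) bsm k (by omega)
    rw [hstep]
    have hq : (PySem.List.pyGetD (PySem.List.pyGetD A ((k : Nat) : Int) []) (m : Int) 0 == 1)
        = (PySem.List.pyGetD (A.getD k []) ((m : Nat) : Int) 0 == 1) := by
      simp [PySem.List.pyGetD_natCast]
    have hcond : ((m : Int) + 1 ≤ (k : Int) ∧
        (k : Int) < (m : Int) + 1 + (((N : Int) - ((m : Int) + 1)).toNat : Int) ∧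
        (PySem.List.pyGetD (PySem.List.pyGetD A ((k : Nat) : Int) []) (m : Int) 0 == 1) = true)
        ↔ (decide (m < k) && (PySem.List.pyGetD (A.getD k []) ((m : Nat) : Int) 0 == 1)) = true := by
      rw [hq]
      constructor
      · rintro ⟨h1, _, h3⟩
        simp only [Bool.and_eq_true, decide_eq_true_eq]
        exact ⟨by omega, h3⟩
      · intro h
        simp only [Bool.and_eq_true, decide_eq_true_eq] at h
        refine ⟨by omega, by omega, h.2⟩
    rw [ih bs hlen k hk, List.filter_append, List.map_append]
    by_cases hc : (decide (m < k) && (PySem.List.pyGetD (A.getD k []) ((m : Nat) : Int) 0 == 1)) = true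
    · rw [if_pos (hcond.mpr hc)]
      simp only [List.filter_cons, List.filter_nil]
      rw [if_pos hc]
      simp [List.append_assoc]
    · rw [if_neg (fun h => hc (hcond.mp h))]
      simp only [List.filter_cons, List.filter_nil]
      rw [if_neg hc]
      simp

-- getD of the all-[] initial bucket list is [].
theorem getD_map_nil (L : List Int) (k : Nat) :
    (L.map (fun _ => ([] : List Int))).getD k [] = [] := by
  induction L generalizing k with
  | nil => rfl
  | cons x L ih => cases k with | zero => rfl | succ k => exact ih k

-- Restricting the column filter j < k turns range N into range k.
theorem filter_range_lt (p : Nat → Bool) (k N : Nat) (hkN : k ≤ N) :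
    (List.range N).filter (fun j => decide (j < k) && p j) = (List.range k).filter p := by
  obtain ⟨m, rfl⟩ := Nat.exists_eq_add_of_le hkN
  rw [List.range_add, List.filter_append]
  have h1 : (List.range k).filter (fun j => decide (j < k) && p j) = (List.range k).filter p := by
    apply List.filter_congr
    intro j hj
    simp [List.mem_range.mp hj]
  have h2 : ((List.range m).map (fun x => k + x)).filter (fun j => decide (j < k) && p j) = [] := by
    rw [List.filter_map]
    have : ((List.range m).filter ((fun j => decide (j < k) && p j) ∘ (fun x => k + x))) = [] := by
      apply List.filter_eq_nil_iff.mpr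
      intro t _
      simp [Function.comp]
    rw [this]; rfl
  rw [h1, h2, List.append_nil]

-- B's buckets are exactly the per-row column lists.
theorem buckets_eq (A : List (List Int)) :
    ((PySem.List.pyRange 0 (PySem.List.len A) 1).foldl
        (fun (bs : List (List Int)) j =>
          (PySem.List.pyRange (j + 1) (PySem.List.len A) 1).foldl
            (fun (bs2 : List (List Int)) i =>
              if PySem.List.pyGetD (PySem.List.pyGetD A i []) j 0 == 1 then
                bs2.modify i.toNat (fun b => b ++ [j])
              else bs2) bs)
        ((PySem.List.pyRange 0 (PySem.List.len A) 1).map (fun _ => [])))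
      = (List.range A.length).map (pvRowf A) := by
  set N := A.length with hN
  have hrange : PySem.List.pyRange 0 (PySem.List.len A) 1
      = (List.range N).map (fun t => ((t : Nat) : Int)) := by
    rw [PySem.List.len_eq, PySem.List.pyRange_zero_natCast]
  rw [hrange]
  set bs0 := ((List.range N).map (fun t => ((t : Nat) : Int))).map
    (fun _ => ([] : List Int)) with hbs0
  have hlen0 : bs0.length = N := by simp [hbs0]
  have hlenres : (((List.range N).map (fun t => ((t : Nat) : Int))).foldl
      (fun bs j =>
        (PySem.List.pyRange (j + 1) (PySem.List.len A) 1).foldl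
          (fun bs2 i =>
            if PySem.List.pyGetD (PySem.List.pyGetD A i []) j 0 == 1 then
              bs2.modify i.toNat (fun b => b ++ [j])
            else bs2) bs) bs0).length = N := by
    rw [outer_fold_length]; exact hlen0
  have hA : PySem.List.len A = (N : Int) := by rw [PySem.List.len_eq]
  rw [hA] at hlenres ⊢
  apply List.ext_getElem
  · rw [hlenres]; simp
  · intro k h1 h2
    have hkN : k < N := by rw [hlenres] at h1; exact h1
    have := outerB_getD A N N bs0 hlen0 k hkN
    have hget : (((List.range N).map (fun t => ((t : Nat) : Int))).foldl
        (fun bs j =>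
          (PySem.List.pyRange (j + 1) (N : Int) 1).foldl
            (fun bs2 i =>
              if PySem.List.pyGetD (PySem.List.pyGetD A i []) j 0 == 1 then
                bs2.modify i.toNat (fun b => b ++ [j])
              else bs2) bs) bs0).getD k []
        = pvRowf A k := by
      rw [this, hbs0, getD_map_nil]
      rw [filter_range_lt _ k N (le_of_lt hkN)]
      simp [pvRowf]
    rw [← List.getD_eq_getElem _ [] h1, ← List.getD_eq_getElem _ [] h2, hget]
    rw [List.getD_eq_getElem _ [] h2]
    simp [List.getElem_map, List.getElem_range]

-- ===== VERDICT (by name: the statement is the Claim_ definition above) =====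
theorem upperSpar_spec : Claim_equal_upperSpar := by
  intro A _ _
  unfold Spec_upperSpar upperSpar upperSpar_alt
  dsimp only
  set N := A.length with hN
  -- B side: buckets are the per-row lists, then the emission fold in closed form.
  rw [buckets_eq A]
  rw [show ([(0 : Int)] : List Int) = [] ++ [(0 : Int)] from by simp]
  have hB := foldB_closed ((List.range N).map (pvRowf A)) [] [] 0
  simp only [PySem.List.len_eq] at hB ⊢
  rw [hB]
  -- A side: inner fold to filter form, then the outer fold in closed form.
  have hrange : PySem.List.pyRange 0 (N : Int) 1
      = (List.range N).map (fun t => ((t : Nat) : Int)) := PySem.List.pyRange_zero_natCast N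
  rw [hrange, List.foldl_map]
  have hbody : ∀ (st : List Int × List Int × Int) (k : Nat),
      ((((PySem.List.pyRange 0 ((k : Nat) : Int) 1).foldl
          (fun (st2 : List Int × Int) j =>
            if PySem.List.pyGetD (PySem.List.pyGetD A ((k : Nat) : Int) []) j 0 == 1 then
              (st2.1 ++ [j], st2.2 + 1)
            else st2) (st.1, st.2.2)).1,
        st.2.1 ++ [st.2.2],
        ((PySem.List.pyRange 0 ((k : Nat) : Int) 1).foldl
          (fun (st2 : List Int × Int) j =>
            if PySem.List.pyGetD (PySem.List.pyGetD A ((k : Nat) : Int) []) j 0 == 1 then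
              (st2.1 ++ [j], st2.2 + 1)
            else st2) (st.1, st.2.2)).2) : List Int × List Int × Int)
      = (st.1 ++ pvRowf A k, st.2.1 ++ [st.2.2], st.2.2 + ((pvRowf A k).length : Int)) := by
    intro st k
    have hfilt : (PySem.List.pyRange 0 ((k : Nat) : Int) 1).filter
        (fun j => PySem.List.pyGetD (PySem.List.pyGetD A ((k : Nat) : Int) []) j 0 == 1)
        = pvRowf A k := by
      rw [PySem.List.pyRange_zero_natCast, List.filter_map, PySem.List.pyGetD_natCast]
      unfold pvRowf
      refine congrArg _ (List.filter_congr ?_)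
      intro j _
      simp [Function.comp, PySem.List.pyGetD_natCast, List.getD_eq_getElem?_getD]
    rw [innerFold_eq, hfilt]
  simp only [hbody]
  have hA := foldA_closed ((List.range N).map (pvRowf A)) [] [] 0
  rw [List.foldl_map] at hA
  rw [hA.1, hA.2]
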